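-- pv_equiv track=rewrite | github.com/skrishna07/MNS-Australia | DirectorsSplitTextFiles.py | extract_directors_dynamically
-- ===== SOURCE A (Python) =====
-- def extract_directors_dynamically(text, name_keyword="Name:"):
--     # Define main designations with their "Previous" variations
--     base_designations = [
--         "Director", "Alternate Director", "Secretary"
--     ]
--     # Generate both current and previous variations for each designation
--     designations = [f"Previous {role}" for role in base_designations] + base_designations
--
--     designation_dict = {}
--     current_designation = None
--     current_entry = []
--
--     for line in text.splitlines():
--         # Detect possible designation keywords dynamically, checking "Previous" variants first
--         matched_designation = None
--         for designation in designations: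
--             if designation in line:
--                 matched_designation = designation
--                 break
--
--         # If a designation is detected, save the current entry and update the designation
--         if matched_designation:
--             if current_entry and current_designation:
--                 # Initialize the designation list if it doesn't exist
--                 if current_designation not in designation_dict:
--                     designation_dict[current_designation] = []
--                 designation_dict[current_designation].append("\n".join(current_entry))
--                 current_entry = []
--
--             # Set the current designation and ensure it is initialized in the dictionary
--             current_designation = matched_designation
--             if current_designation not in designation_dict:
--                 designation_dict[current_designation] = []
--
--         # Detect start of a new director entry within the same designation
--         elif name_keyword in line and current_designation:
--             # Save the current director entry if it exists
--             if current_entry: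
--                 designation_dict[current_designation].append("\n".join(current_entry))
--                 current_entry = []
--
--         # Continue adding lines to the current entry
--         if current_designation:
--             current_entry.append(line)
--
--     # Add the last director entry after the loop ends
--     if current_entry and current_designation:
--         designation_dict[current_designation].append("\n".join(current_entry))
--
--     return designation_dict
-- ===== SOURCE B (Python) =====
-- def extract_directors_dynamically(text, name_keyword="Name:"):
--     base_designations = ["Director", "Alternate Director", "Secretary"]
--     designations = [f"Previous {role}" for role in base_designations] + base_designations
--
--     def match_designation(line):
--         for designation in designations:
--             if designation in line:
--                 return designation
--         return None
--
--     # Pass 1: cut the text into blocks, each opened by a designation line;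
--     # lines before the first designation line are dropped.
--     blocks = []  # list of (designation, [lines])
--     for line in text.splitlines():
--         matched = match_designation(line)
--         if matched is not None:
--             blocks.append((matched, [line]))
--         elif blocks:
--             blocks[-1][1].append(line)
--
--     # Pass 2: split each block into entries at name_keyword lines
--     # (the block's header line stays with the first entry) and group by designation.
--     result = {}
--     for designation, block_lines in blocks:
--         entries = []
--         current = [block_lines[0]]
--         for line in block_lines[1:]:
--             if name_keyword in line:
--                 entries.append("\n".join(current))
--                 current = [line]
--             else:
--                 current.append(line)
--         entries.append("\n".join(current))
--         result.setdefault(designation, []).extend(entries)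
--     return result
-- ===== Notes on version B (the rewrite author's own statement) =====
-- stated objective: alternative
-- what changed: Replaces A's single stateful line loop (dict + current_designation + current_entry updated across three interleaved branches) with two passes: first cut the lines into designation-headed blocks (lines before the first designation dropped), then split each block into entries at name_keyword lines and accumulate them per designation with setdefault/extend.
import Mathlib
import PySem

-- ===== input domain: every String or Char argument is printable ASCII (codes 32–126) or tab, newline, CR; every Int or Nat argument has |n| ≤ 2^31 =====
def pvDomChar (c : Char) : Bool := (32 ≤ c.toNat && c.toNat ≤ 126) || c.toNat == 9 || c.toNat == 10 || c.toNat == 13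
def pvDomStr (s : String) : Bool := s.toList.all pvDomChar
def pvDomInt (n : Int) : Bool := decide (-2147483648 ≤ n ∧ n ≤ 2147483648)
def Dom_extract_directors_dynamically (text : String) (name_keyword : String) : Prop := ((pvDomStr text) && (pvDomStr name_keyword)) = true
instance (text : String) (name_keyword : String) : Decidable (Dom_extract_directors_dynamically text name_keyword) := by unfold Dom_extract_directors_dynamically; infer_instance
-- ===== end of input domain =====

-- B replaces A's single stateful line loop (current_designation/current_entry juggled across three branches)
-- by two passes: cut the lines into designation-headed blocks, then split each block into entries and group
-- by designation; objective: alternative (same cost, clearer decomposition). Return-value equivalence only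
-- (neither mutates its arguments).

-- ===== PORT A =====
def pvBaseA : List String := ["Director", "Alternate Director", "Secretary"]
def pvDesigsA : List String := pvBaseA.map (fun role => "Previous " ++ role) ++ pvBaseA

-- A's inner 'for designation in designations: if designation in line: break'
def pvFindDesigA : List String → String → Option String
  | [], _ => none
  | dsg :: ds, line => if PySem.Str.isIn dsg line then some dsg else pvFindDesigA ds line

-- one iteration of A's 'for line in text.splitlines()' over state (dict, current_designation, current_entry)
def pvStepA (kw : String)
    (st : PySem.Dict String (List String) × Option String × List String) (line : String) :
    PySem.Dict String (List String) × Option String × List String :=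
  let d := st.1
  let cd := st.2.1
  let ce := st.2.2
  match pvFindDesigA pvDesigsA line with
  | some m =>
      match cd, ce with
      | some c, _ :: _ =>
          (((d.setdefault c []).modify c [] (· ++ [PySem.Str.join "\n" ce])).setdefault m [],
           some m, [] ++ [line])
      | _, _ => (d.setdefault m [], some m, ce ++ [line])
  | none =>
      if PySem.Str.isIn kw line then
        match cd, ce with
        | some c, _ :: _ => (d.modify c [] (· ++ [PySem.Str.join "\n" ce]), some c, [] ++ [line])
        | some c, [] => (d, some c, [] ++ [line])
        | none, _ => (d, none, ce)
      else
        match cd with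
        | some c => (d, some c, ce ++ [line])
        | none => (d, none, ce)

-- A's trailing 'if current_entry and current_designation: …append(...)'
def pvFinishA (st : PySem.Dict String (List String) × Option String × List String) :
    PySem.Dict String (List String) :=
  match st.2.1, st.2.2 with
  | some c, _ :: _ => st.1.modify c [] (· ++ [PySem.Str.join "\n" st.2.2])
  | _, _ => st.1

def extract_directors_dynamically (text : String) (name_keyword : String) : List (String × List String) :=
  (pvFinishA ((PySem.Str.splitlines text).foldl (pvStepA name_keyword)
      (PySem.Dict.empty, none, []))).items

-- ===== PORT B =====
def pvBaseB : List String := ["Director", "Alternate Director", "Secretary"]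
def pvDesigsB : List String := pvBaseB.map (fun role => "Previous " ++ role) ++ pvBaseB

def pvMatchB (line : String) : Option String :=
  pvDesigsB.find? (fun dsg => PySem.Str.isIn dsg line)

-- 'blocks[-1][1].append(line)'
def pvModLast (f : String × List String → String × List String) :
    List (String × List String) → List (String × List String)
  | [] => []
  | [p] => [f p]
  | p :: ps => p :: pvModLast f ps

-- pass 1: one iteration of the block-cutting loop
def pvStep1B (blocks : List (String × List String)) (line : String) : List (String × List String) :=
  match pvMatchB line with
  | some m => blocks ++ [(m, [line])]
  | none => if blocks.isEmpty then blocks else pvModLast (fun p => (p.1, p.2 ++ [line])) blocks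

-- pass 2 inner loop: split a block's tail into entries at name_keyword lines
def pvEntriesB (kw : String) : List String → List String → List String → List String
  | current, entries, [] => entries ++ [PySem.Str.join "\n" current]
  | current, entries, l :: ls =>
      if PySem.Str.isIn kw l then pvEntriesB kw [l] (entries ++ [PySem.Str.join "\n" current]) ls
      else pvEntriesB kw (current ++ [l]) entries ls

-- pass 2: one block → result.setdefault(designation, []).extend(entries)
-- (pass 1 never produces a block with an empty line list, so the [] branch is unreachable)
def pvStep2B (kw : String) (d : PySem.Dict String (List String)) (blk : String × List String) :
    PySem.Dict String (List String) :=
  match blk.2 with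
  | [] => d
  | h :: t => d.modify blk.1 [] (· ++ pvEntriesB kw [h] [] t)

def extract_directors_dynamically_alt (text : String) (name_keyword : String) : List (String × List String) :=
  (((PySem.Str.splitlines text).foldl pvStep1B []).foldl (pvStep2B name_keyword)
      PySem.Dict.empty).items

-- ===== PRECONDITION & SPEC =====
def Spec_extract_directors_dynamically (text : String) (name_keyword : String) (out : List (String × List String)) : Prop := out = extract_directors_dynamically_alt text name_keyword
instance (text : String) (name_keyword : String) (out : List (String × List String)) : Decidable (Spec_extract_directors_dynamically text name_keyword out) := by unfold Spec_extract_directors_dynamically; infer_instance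

-- ===== CLAIM (what is proved, stated in full; the proofs are below) =====
def Claim_equal_extract_directors_dynamically : Prop := ∀ (text : String) (name_keyword : String), Dom_extract_directors_dynamically text name_keyword → Spec_extract_directors_dynamically text name_keyword (extract_directors_dynamically text name_keyword)

-- ===== LEMMAS AND PROOFS =====

set_option maxHeartbeats 1000000

-- the two designation matchers agree
theorem findA_eq_find? (ds : List String) (line : String) :
    pvFindDesigA ds line = ds.find? (fun dsg => PySem.Str.isIn dsg line) := by
  induction ds with
  | nil => rfl
  | cons d ds ih =>
      simp only [pvFindDesigA, List.find?]
      cases PySem.Str.isIn d line <;> simp [ih]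

theorem findA_eq (line : String) : pvFindDesigA pvDesigsA line = pvMatchB line := by
  rw [findA_eq_find?]; rfl

-- recursive characterisation of pass 1 --------------------------------------

def blocksCont (c : String) (acc : List String) : List String → List (String × List String)
  | [] => [(c, acc)]
  | l :: ls =>
      match pvMatchB l with
      | some m => (c, acc) :: blocksCont m [l] ls
      | none => blocksCont c (acc ++ [l]) ls

def blocksRec : List String → List (String × List String)
  | [] => []
  | l :: ls =>
      match pvMatchB l with
      | some m => blocksCont m [l] ls
      | none => blocksRec ls

theorem modLast_append (f : String × List String → String × List String)
    (bs : List (String × List String)) (p : String × List String) :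
    pvModLast f (bs ++ [p]) = bs ++ [f p] := by
  induction bs with
  | nil => rfl
  | cons q qs ih =>
      cases qs with
      | nil => rfl
      | cons r rs => simpa [pvModLast] using ih

theorem pass1_cont (ls : List String) :
    ∀ (bs : List (String × List String)) (c : String) (acc : List String),
    List.foldl pvStep1B (bs ++ [(c, acc)]) ls = bs ++ blocksCont c acc ls := by
  induction ls with
  | nil => intro bs c acc; simp [blocksCont]
  | cons l ls ih =>
      intro bs c acc
      cases h : pvMatchB l with
      | some m =>
          have e1 : pvStep1B (bs ++ [(c, acc)]) l = (bs ++ [(c, acc)]) ++ [(m, [l])] := by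
            simp [pvStep1B, h]
          have e2 : blocksCont c acc (l :: ls) = (c, acc) :: blocksCont m [l] ls := by
            simp [blocksCont, h]
          rw [List.foldl_cons, e1, e2, ih (bs ++ [(c, acc)]) m [l]]
          simp
      | none =>
          have e1 : pvStep1B (bs ++ [(c, acc)]) l = bs ++ [(c, acc ++ [l])] := by
            simp [pvStep1B, h, modLast_append]
          have e2 : blocksCont c acc (l :: ls) = blocksCont c (acc ++ [l]) ls := by
            simp [blocksCont, h]
          rw [List.foldl_cons, e1, e2, ih bs c (acc ++ [l])]

theorem pass1_eq (ls : List String) : List.foldl pvStep1B [] ls = blocksRec ls := by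
  induction ls with
  | nil => rfl
  | cons l ls ih =>
      cases h : pvMatchB l with
      | some m =>
          have e1 : pvStep1B [] l = [(m, [l])] := by simp [pvStep1B, h]
          have e2 : blocksRec (l :: ls) = blocksCont m [l] ls := by simp [blocksRec, h]
          rw [List.foldl_cons, e1, e2]
          simpa using pass1_cont ls [] m [l]
      | none =>
          have e1 : pvStep1B [] l = [] := by simp [pvStep1B, h]
          have e2 : blocksRec (l :: ls) = blocksRec ls := by simp [blocksRec, h]
          rw [List.foldl_cons, e1, e2, ih]

-- dict lemmas ----------------------------------------------------------------

theorem dict_mod_mod (d : PySem.Dict String (List String)) (k : String) (E1 E2 : List String) :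
    (d.modify k [] (· ++ E1)).modify k [] (· ++ E2) = d.modify k [] (· ++ (E1 ++ E2)) := by
  simp only [PySem.Dict.modify, PySem.Dict.getD_insert_self, PySem.Dict.insert_insert_self,
    List.append_assoc]

theorem dict_mod_sd (d : PySem.Dict String (List String)) (k : String) (E : List String) :
    (d.setdefault k []).modify k [] (· ++ E) = d.modify k [] (· ++ E) := by
  cases hc : d.contains k with
  | true => rw [PySem.Dict.setdefault_of_contains _ _ hc]
  | false =>
      rw [PySem.Dict.setdefault_of_not_contains _ _ hc]
      simp only [PySem.Dict.modify, PySem.Dict.getD_insert_self, PySem.Dict.insert_insert_self,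
        List.nil_append, PySem.Dict.getD_of_not_contains _ _ hc]

-- A's loop with an open designation, written as a recursion -------------------

def alufA (kw : String) (d : PySem.Dict String (List String)) (c : String) (cur : List String) :
    List String → PySem.Dict String (List String)
  | [] => d.modify c [] (· ++ [PySem.Str.join "\n" cur])
  | l :: ls =>
      match pvMatchB l with
      | some m =>
          alufA kw (((d.setdefault c []).modify c [] (· ++ [PySem.Str.join "\n" cur])).setdefault m [])
            m [l] ls
      | none =>
          if PySem.Str.isIn kw l then
            alufA kw (d.modify c [] (· ++ [PySem.Str.join "\n" cur])) c [l] ls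
          else alufA kw d c (cur ++ [l]) ls

theorem runA_open (kw : String) (ls : List String) :
    ∀ (d : PySem.Dict String (List String)) (c : String) (x : String) (cur : List String),
    pvFinishA (List.foldl (pvStepA kw) (d, some c, x :: cur) ls) = alufA kw d c (x :: cur) ls := by
  induction ls with
  | nil => intro d c x cur; rfl
  | cons l ls ih =>
      intro d c x cur
      simp only [List.foldl_cons, pvStepA, alufA, findA_eq]
      cases h : pvMatchB l with
      | some m => simpa [h] using ih _ m l []
      | none =>
          cases hk : PySem.Str.isIn kw l with
          | true => simpa [hk] using ih _ c l []
          | false =>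
              have := ih d c x (cur ++ [l])
              simpa [hk] using this

-- the entries accumulator factors out
theorem entries_acc (kw : String) (ls : List String) :
    ∀ (cur E : List String), pvEntriesB kw cur E ls = E ++ pvEntriesB kw cur [] ls := by
  induction ls with
  | nil => intro cur E; simp [pvEntriesB]
  | cons l ls ih =>
      intro cur E
      cases hk : PySem.Chars.isIn kw.toList l.toList with
      | true =>
          have e1 : ∀ E', pvEntriesB kw cur E' (l :: ls) =
              pvEntriesB kw [l] (E' ++ [PySem.Str.join "\n" cur]) ls := by
            intro E'; simp [pvEntriesB, hk]
          rw [e1 E, e1 [], ih [l] (E ++ [PySem.Str.join "\n" cur]),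
            ih [l] ([] ++ [PySem.Str.join "\n" cur])]
          simp
      | false =>
          have e1 : ∀ E', pvEntriesB kw cur E' (l :: ls) = pvEntriesB kw (cur ++ [l]) E' ls := by
            intro E'; simp [pvEntriesB, hk]
          rw [e1 E, e1 [], ih (cur ++ [l]) E]

-- split a line list at the first designation line
def spanB : List String → List String × List String
  | [] => ([], [])
  | l :: ls =>
      match pvMatchB l with
      | some _ => ([], l :: ls)
      | none => ((l :: (spanB ls).1), (spanB ls).2)

theorem blocksCont_eq (ls : List String) :
    ∀ (c : String) (acc : List String),
    blocksCont c acc ls = (c, acc ++ (spanB ls).1) :: blocksRec (spanB ls).2 := by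
  induction ls with
  | nil => intro c acc; simp [blocksCont, spanB, blocksRec]
  | cons l ls ih =>
      intro c acc
      cases h : pvMatchB l with
      | some m => simp [blocksCont, spanB, h, blocksRec]
      | none =>
          have e1 : blocksCont c acc (l :: ls) = blocksCont c (acc ++ [l]) ls := by
            simp [blocksCont, h]
          have e2 : spanB (l :: ls) = (l :: (spanB ls).1, (spanB ls).2) := by
            simp [spanB, h]
          rw [e1, e2, ih c (acc ++ [l])]
          simp

theorem aluf_eq (kw : String) (ls : List String) :
    ∀ (d : PySem.Dict String (List String)) (c : String) (cur : List String),
    alufA kw d c cur ls =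
      List.foldl (pvStep2B kw)
        (d.modify c [] (· ++ pvEntriesB kw cur [] (spanB ls).1))
        (blocksRec (spanB ls).2) := by
  induction ls with
  | nil => intro d c cur; simp [alufA, spanB, pvEntriesB, blocksRec]
  | cons l ls ih =>
      intro d c cur
      cases h : pvMatchB l with
      | some m =>
          have eA : alufA kw d c cur (l :: ls) =
              alufA kw (((d.setdefault c []).modify c []
                  (· ++ [PySem.Str.join "\n" cur])).setdefault m []) m [l] ls := by
            simp [alufA, h]
          have eS : spanB (l :: ls) = ([], l :: ls) := by simp [spanB, h]
          have eB : blocksRec (l :: ls) = blocksCont m [l] ls := by simp [blocksRec, h]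
          rw [eA, ih _ m [l], dict_mod_sd, dict_mod_sd, eS]
          rw [eB, blocksCont_eq, List.foldl_cons]
          have eStep : ∀ D, pvStep2B kw D (m, [l] ++ (spanB ls).1) =
              D.modify m [] (· ++ pvEntriesB kw [l] [] (spanB ls).1) := by
            intro D; simp [pvStep2B]
          rw [eStep]
          simp [pvEntriesB]
      | none =>
          have eS : spanB (l :: ls) = (l :: (spanB ls).1, (spanB ls).2) := by
            simp [spanB, h]
          cases hk : PySem.Chars.isIn kw.toList l.toList with
          | true =>
              have eA : alufA kw d c cur (l :: ls) =
                  alufA kw (d.modify c [] (· ++ [PySem.Str.join "\n" cur])) c [l] ls := by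
                simp [alufA, h, hk]
              have eE : pvEntriesB kw cur [] (l :: (spanB ls).1) =
                  [PySem.Str.join "\n" cur] ++ pvEntriesB kw [l] [] (spanB ls).1 := by
                have : pvEntriesB kw cur [] (l :: (spanB ls).1) =
                    pvEntriesB kw [l] ([] ++ [PySem.Str.join "\n" cur]) (spanB ls).1 := by
                  simp [pvEntriesB, hk]
                rw [this, entries_acc]
                simp
              rw [eA, ih _ c [l], dict_mod_mod, eS]
              rw [eE]
          | false =>
              have eA : alufA kw d c cur (l :: ls) = alufA kw d c (cur ++ [l]) ls := by
                simp [alufA, h, hk]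
              have eE : pvEntriesB kw cur [] (l :: (spanB ls).1) =
                  pvEntriesB kw (cur ++ [l]) [] (spanB ls).1 := by
                simp [pvEntriesB, hk]
              rw [eA, ih d c (cur ++ [l]), eS]
              rw [eE]

theorem runA_closed (kw : String) (ls : List String) :
    ∀ (d : PySem.Dict String (List String)),
    pvFinishA (List.foldl (pvStepA kw) (d, none, []) ls) =
      List.foldl (pvStep2B kw) d (List.foldl pvStep1B [] ls) := by
  induction ls with
  | nil => intro d; rfl
  | cons l ls ih =>
      intro d
      cases h : pvMatchB l with
      | some m =>
          have eA : pvStepA kw (d, none, []) l = (d.setdefault m [], some m, [l]) := by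
            simp [pvStepA, findA_eq, h]
          have eB : blocksRec (l :: ls) = blocksCont m [l] ls := by simp [blocksRec, h]
          rw [List.foldl_cons, eA, runA_open, aluf_eq]
          rw [dict_mod_sd]
          rw [pass1_eq, eB, blocksCont_eq, List.foldl_cons]
          have eStep : ∀ D, pvStep2B kw D (m, [l] ++ (spanB ls).1) =
              D.modify m [] (· ++ pvEntriesB kw [l] [] (spanB ls).1) := by
            intro D; simp [pvStep2B]
          rw [eStep]
      | none =>
          have eA : pvStepA kw (d, none, []) l = (d, none, []) := by
            simp [pvStepA, findA_eq, h]
          have eB : blocksRec (l :: ls) = blocksRec ls := by simp [blocksRec, h]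
          rw [List.foldl_cons, eA, ih, pass1_eq, pass1_eq, eB]

-- ===== VERDICT (by name: the statement is the Claim_ definition above) =====
theorem extract_directors_dynamically_spec : Claim_equal_extract_directors_dynamically := by
  intro text kw _
  show _ = _
  unfold extract_directors_dynamically extract_directors_dynamically_alt
  rw [runA_closed]
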